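-- pv_equiv track=rewrite | github.com/serpentk/adventofcode2024 | day14/day14_2.py | guess_tree
-- ===== SOURCE A (Python) =====
-- TREE_HEIGHT = 10
--
-- def guess_tree(space):
--     for col in space:
--         i = 0
--         while i < len(col) - TREE_HEIGHT:
--             for c in range(TREE_HEIGHT):
--                 if col[i + c] == 0:
--                     i = i + c + 1
--                     break
--                 if c == TREE_HEIGHT - 1:
--                     return True
--     return False
-- ===== SOURCE B (Python) =====
-- TREE_HEIGHT = 10
--
-- def guess_tree(space):
--     for col in space:
--         run = 0
--         for v in col[:-1]:
--             if v == 0: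
--                 run = 0
--             else:
--                 run += 1
--                 if run == TREE_HEIGHT:
--                     return True
--     return False
-- ===== Notes on version B (the rewrite author's own statement) =====
-- stated objective: simpler
-- what changed: Replaces A's nested while/for window scan with jump-ahead index arithmetic by a single pass per column over col[:-1] maintaining one run counter that resets on zeros and triggers at TREE_HEIGHT.
import Mathlib
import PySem

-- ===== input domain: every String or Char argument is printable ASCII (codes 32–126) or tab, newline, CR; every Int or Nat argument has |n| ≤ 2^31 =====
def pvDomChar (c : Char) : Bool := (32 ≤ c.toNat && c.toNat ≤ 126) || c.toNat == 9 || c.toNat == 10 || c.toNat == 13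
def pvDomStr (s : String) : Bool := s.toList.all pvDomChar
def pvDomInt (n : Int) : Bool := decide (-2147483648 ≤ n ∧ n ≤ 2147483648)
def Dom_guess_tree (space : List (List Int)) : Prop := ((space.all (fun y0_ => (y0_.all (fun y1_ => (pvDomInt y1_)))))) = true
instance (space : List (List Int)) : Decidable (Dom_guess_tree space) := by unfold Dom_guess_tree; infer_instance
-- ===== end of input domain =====

-- B replaces A's jump-ahead window scan with a single run counter over col[:-1]: simpler, same result.

-- ===== PORT A =====
-- inner 'for c in range(TREE_HEIGHT)': result 'none' = 'return True', 'some j' = break with i set to j.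
-- Called with c = 0, k = 10 (k = remaining fuel, c + k = 10).  The 'k = 0' branch is unreachable
-- (the 'c == 9' branch always fires first); its value 'some (i + 1)' is dead code.
-- col.getD (i + c) 0 is exact for Python's col[i + c]: the while-guard keeps i + c < len(col).
def pvAInner (col : List Int) (i : Nat) (c : Nat) : Nat → Option Nat
  | 0 => some (i + 1)
  | k + 1 =>
    if col.getD (i + c) 0 == 0 then some (i + c + 1)
    else if c == 9 then none
    else pvAInner col i (c + 1) k

-- needed by pvACol's termination proof
theorem pvAInner_lt (col : List Int) (i : Nat) : ∀ (k c j : Nat), pvAInner col i c k = some j → i < j := by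
  intro k
  induction k with
  | zero => intro c j h; simp [pvAInner] at h; omega
  | succ k ih =>
    intro c j h
    simp only [pvAInner] at h
    split at h
    · simp at h; omega
    · split at h
      · simp at h
      · exact ih _ _ h

-- 'while i < len(col) - TREE_HEIGHT: …' for one column
def pvACol (col : List Int) (i : Nat) : Bool :=
  if _h : i < col.length - 10 then
    match hm : pvAInner col i 0 10 with
    | none => true
    | some j => pvACol col j
  else false
termination_by col.length - i
decreasing_by
  have := pvAInner_lt col i 10 0 _ hm
  omega

def guess_tree (space : List (List Int)) : Bool :=
  match space with
  | [] => false
  | col :: rest => if pvACol col 0 then true else guess_tree rest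

-- ===== PORT B =====
-- 'for v in col[:-1]' with a run counter
def pvBGo : List Int → Nat → Bool
  | [], _ => false
  | v :: rest, run =>
    if v == 0 then pvBGo rest 0
    else if run + 1 == 10 then true
    else pvBGo rest (run + 1)

def pvBCol (col : List Int) : Bool := pvBGo (PySem.List.slice col none (some (-1))) 0

def guess_tree_alt (space : List (List Int)) : Bool :=
  match space with
  | [] => false
  | col :: rest => if pvBCol col then true else guess_tree_alt rest

-- ===== PRECONDITION & SPEC =====
def Spec_guess_tree (space : List (List Int)) (out : Bool) : Prop := out = guess_tree_alt space
instance (space : List (List Int)) (out : Bool) : Decidable (Spec_guess_tree space out) := by unfold Spec_guess_tree; infer_instance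

-- ===== CLAIM (what is proved, stated in full; the proofs are below) =====
def Claim_equal_guess_tree : Prop := ∀ (space : List (List Int)), Dom_guess_tree space → Spec_guess_tree space (guess_tree space)

-- ===== LEMMAS AND PROOFS =====

-- a tree-height run of nonzeros fitting strictly before the last entry
def pvWin (col : List Int) (s : Nat) : Prop := s + 10 < col.length ∧ ∀ c, c < 10 → col.getD (s + c) 0 ≠ 0

theorem pvAInner_none (col : List Int) (i : Nat) :
    ∀ (k c : Nat), 0 < k → c + k = 10 →
      (pvAInner col i c k = none ↔ ∀ d, c ≤ d → d < 10 → col.getD (i + d) 0 ≠ 0) := by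
  intro k
  induction k with
  | zero => intro c hk _; omega
  | succ k ih =>
    intro c _ hc
    simp only [pvAInner]
    split
    · rename_i hz
      simp only [beq_iff_eq] at hz
      constructor
      · intro h; simp at h
      · intro h; exact absurd hz (h c (le_refl _) (by omega))
    · rename_i hz
      simp only [beq_iff_eq] at hz
      split
      · rename_i h9
        simp only [beq_iff_eq] at h9
        subst h9
        constructor
        · intro _ d hd hd10
          have : d = 9 := by omega
          subst this; exact hz
        · intro _; rfl
      · rename_i h9
        simp only [beq_iff_eq] at h9
        rw [ih (c + 1) (by omega) (by omega)]
        constructor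
        · intro h d hd hd10
          rcases Nat.eq_or_lt_of_le hd with rfl | hlt
          · exact hz
          · exact h d hlt hd10
        · intro h d hd hd10; exact h d (by omega) hd10

theorem pvAInner_some (col : List Int) (i : Nat) :
    ∀ (k c j : Nat), 0 < k → c + k = 10 → pvAInner col i c k = some j →
      ∃ d, c ≤ d ∧ d < 10 ∧ j = i + d + 1 ∧ col.getD (i + d) 0 = 0 := by
  intro k
  induction k with
  | zero => intro c j hk _ _; omega
  | succ k ih =>
    intro c j _ hc h
    simp only [pvAInner] at h
    split at h
    · rename_i hz
      simp only [beq_iff_eq] at hz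
      simp only [Option.some.injEq] at h
      exact ⟨c, le_refl _, by omega, h.symm, hz⟩
    · split at h
      · simp at h
      · rename_i h9
        simp only [beq_iff_eq] at h9
        obtain ⟨d, hd1, hd2, hd3, hd4⟩ := ih (c + 1) j (by omega) (by omega) h
        exact ⟨d, by omega, hd2, hd3, hd4⟩

theorem pvACol_iff (col : List Int) :
    ∀ (n i : Nat), col.length - i ≤ n → (pvACol col i = true ↔ ∃ s, i ≤ s ∧ pvWin col s) := by
  intro n
  induction n with
  | zero =>
    intro i hi
    rw [pvACol]
    have hguard : ¬ i < col.length - 10 := by omega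
    simp only [hguard, dite_false]
    constructor
    · intro h; simp at h
    · rintro ⟨s, hs, hw, _⟩; omega
  | succ n ih =>
    intro i hi
    rw [pvACol]
    by_cases hguard : i < col.length - 10
    · simp only [hguard, dite_true]
      cases hm : pvAInner col i 0 10 with
      | none =>
        simp only [true_iff]
        refine ⟨i, le_refl _, by omega, ?_⟩
        intro c hc
        exact (pvAInner_none col i 10 0 (by omega) rfl).mp hm c (Nat.zero_le _) hc
      | some j =>
        obtain ⟨d, _, hd10, hj, hz⟩ := pvAInner_some col i 10 0 j (by omega) rfl hm
        have hij : i < j := by omega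
        rw [ih j (by omega)]
        constructor
        · rintro ⟨s, hs, hw⟩; exact ⟨s, by omega, hw⟩
        · rintro ⟨s, hs, hw⟩
          refine ⟨s, ?_, hw⟩
          by_contra hlt
          push Not at hlt
          -- window at s would contain the zero at index i + d
          have hceq : s + (i + d - s) = i + d := by omega
          have := hw.2 (i + d - s) (by omega)
          rw [hceq] at this
          exact this hz
    · simp only [hguard, dite_false]
      constructor
      · intro h; simp at h
      · rintro ⟨s, hs, hw, _⟩; omega

theorem pvBGo_complete0 :
    ∀ (l : List Int) (run : Nat), run < 10 → 10 - run ≤ l.length →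
      (∀ d, d < 10 - run → l.getD d 0 ≠ 0) → pvBGo l run = true := by
  intro l
  induction l with
  | nil => intro run h1 h2 _; simp at h2; omega
  | cons v rest ih =>
    intro run h1 h2 h3
    have hv : v ≠ 0 := by
      have := h3 0 (by omega); simpa using this
    rw [pvBGo, if_neg (by simpa using hv)]
    by_cases h10 : run + 1 = 10
    · rw [if_pos (by simpa using h10)]
    · rw [if_neg (by simpa using h10)]
      refine ih (run + 1) (by omega) (by simp at h2 ⊢; omega) ?_
      intro d hd
      have := h3 (d + 1) (by omega)
      simpa using this

theorem pvBGo_complete :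
    ∀ (l : List Int) (run s : Nat), run < 10 → s + 10 ≤ l.length →
      (∀ c, c < 10 → l.getD (s + c) 0 ≠ 0) → pvBGo l run = true := by
  intro l
  induction l with
  | nil => intro run s _ h2 _; simp at h2
  | cons v rest ih =>
    intro run s h1 h2 h3
    cases s with
    | zero =>
      refine pvBGo_complete0 (v :: rest) run h1 (by simp at h2 ⊢; omega) ?_
      intro d hd
      have := h3 d (by omega)
      simpa using this
    | succ s =>
      simp only [pvBGo]
      split
      · exact ih 0 s (by omega) (by simp at h2; omega) (fun c hc => by
          have := h3 c hc
          simpa [Nat.succ_add] using this)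
      · split
        · rfl
        · rename_i h10
          simp only [beq_iff_eq] at h10
          exact ih (run + 1) s (by omega) (by simp at h2; omega) (fun c hc => by
            have := h3 c hc
            simpa [Nat.succ_add] using this)

theorem pvBGo_sound :
    ∀ (l : List Int) (run : Nat), run < 10 → pvBGo l run = true →
      ((10 - run ≤ l.length ∧ ∀ d, d < 10 - run → l.getD d 0 ≠ 0) ∨
       ∃ s, s + 10 ≤ l.length ∧ ∀ c, c < 10 → l.getD (s + c) 0 ≠ 0) := by
  intro l
  induction l with
  | nil => intro run _ h; simp [pvBGo] at h
  | cons v rest ih =>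
    intro run h1 h
    simp only [pvBGo] at h
    split at h
    · rename_i hz
      simp only [beq_iff_eq] at hz
      rcases ih 0 (by omega) h with ⟨hl, hd⟩ | ⟨s, hl, hd⟩
      · refine Or.inr ⟨1, by simp; omega, ?_⟩
        intro c hc
        have := hd c (by omega)
        simpa [Nat.add_comm 1 c] using this
      · refine Or.inr ⟨s + 1, by simp; omega, ?_⟩
        intro c hc
        have := hd c hc
        simpa [Nat.succ_add] using this
    · rename_i hz
      simp only [beq_iff_eq] at hz
      split at h
      · rename_i h10
        simp only [beq_iff_eq] at h10
        refine Or.inl ⟨by simp; omega, ?_⟩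
        intro d hd
        have : d = 0 := by omega
        subst this; simpa using hz
      · rename_i h10
        simp only [beq_iff_eq] at h10
        rcases ih (run + 1) (by omega) h with ⟨hl, hd⟩ | ⟨s, hl, hd⟩
        · refine Or.inl ⟨by simp; omega, ?_⟩
          intro d hd'
          cases d with
          | zero => simpa using hz
          | succ d =>
            have := hd d (by omega)
            simpa using this
        · refine Or.inr ⟨s + 1, by simp; omega, ?_⟩
          intro c hc
          have := hd c hc
          simpa [Nat.succ_add] using this

theorem pvDropLast_getD (col : List Int) (x : Nat) (hx : x < col.length - 1) :
    col.dropLast.getD x 0 = col.getD x 0 := by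
  have hlen : x < col.dropLast.length := by simp; omega
  have hlen2 : x < col.length := by omega
  rw [List.getD_eq_getElem _ _ hlen, List.getD_eq_getElem _ _ hlen2]
  exact List.getElem_dropLast hlen

theorem pvBCol_iff (col : List Int) : pvBCol col = true ↔ ∃ s, pvWin col s := by
  unfold pvBCol
  rw [PySem.List.slice_to_neg_one]
  constructor
  · intro h
    rcases pvBGo_sound _ 0 (by omega) h with ⟨hl, hd⟩ | ⟨s, hl, hd⟩
    · simp only [List.length_dropLast] at hl
      refine ⟨0, by omega, ?_⟩
      intro c hc
      rw [Nat.zero_add]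
      have := hd c (by omega)
      rwa [pvDropLast_getD col c (by omega)] at this
    · simp only [List.length_dropLast] at hl
      refine ⟨s, by omega, ?_⟩
      intro c hc
      have := hd c hc
      rwa [pvDropLast_getD col _ (by omega)] at this
  · rintro ⟨s, hl, hd⟩
    refine pvBGo_complete col.dropLast 0 s (by omega) (by simp; omega) ?_
    intro c hc
    rw [pvDropLast_getD col _ (by omega)]
    exact hd c hc

theorem pvCol_eq (col : List Int) : pvACol col 0 = pvBCol col := by
  have hA := pvACol_iff col col.length 0 (by omega)
  have hB := pvBCol_iff col
  cases hb : pvBCol col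
  · cases ha : pvACol col 0
    · rfl
    · exfalso
      obtain ⟨s, _, hw⟩ := hA.mp ha
      have := hB.mpr ⟨s, hw⟩
      rw [hb] at this; exact Bool.false_ne_true this
  · obtain ⟨s, hw⟩ := hB.mp hb
    exact hA.mpr ⟨s, Nat.zero_le _, hw⟩

theorem pvMain : ∀ (space : List (List Int)), guess_tree space = guess_tree_alt space
  | [] => rfl
  | col :: rest => by
    simp only [guess_tree, guess_tree_alt, pvCol_eq col]
    split <;> [rfl; exact pvMain rest]

-- ===== VERDICT (by name: the statement is the Claim_ definition above) =====
theorem guess_tree_spec : Claim_equal_guess_tree := by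
  intro space _
  unfold Spec_guess_tree
  exact pvMain space
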